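-- pv_equiv track=rewrite | github.com/blistergeist/playground | checkio.py | grille_cipher
-- ===== SOURCE A (Python) =====
-- def grille_cipher(grille, cipher):
--     password = ''
--     for i in range(4):
--         for j in range(4):
--             for k in range(4):
--                 if grille[j][k] == 'X':
--                     password += cipher[j][k]
--         grille = list(zip(*grille[::-1]))
--     return password
-- ===== SOURCE B (Python) =====
-- def grille_cipher(grille, cipher):
--     R, C = len(grille), len(grille[0])
--     password = ''
--     for r in range(4):
--         for j in range(4):
--             for k in range(4):
--                 a, b = j, k
--                 for m in range(r, 0, -1):
--                     rows = R if (m - 1) % 2 == 0 else C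
--                     a, b = rows - 1 - b, a
--                 if grille[a][b] == 'X':
--                     password += cipher[j][k]
--     return password
-- ===== Notes on version B (the rewrite author's own statement) =====
-- stated objective: alternative
-- what changed: B never builds rotated copies of the grille: it keeps the grille fixed and un-rotates each (j,k) coordinate through the inverse rotation map (j,k)->(3-k,j) applied r times, indexing only the original grille.
import Mathlib
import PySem

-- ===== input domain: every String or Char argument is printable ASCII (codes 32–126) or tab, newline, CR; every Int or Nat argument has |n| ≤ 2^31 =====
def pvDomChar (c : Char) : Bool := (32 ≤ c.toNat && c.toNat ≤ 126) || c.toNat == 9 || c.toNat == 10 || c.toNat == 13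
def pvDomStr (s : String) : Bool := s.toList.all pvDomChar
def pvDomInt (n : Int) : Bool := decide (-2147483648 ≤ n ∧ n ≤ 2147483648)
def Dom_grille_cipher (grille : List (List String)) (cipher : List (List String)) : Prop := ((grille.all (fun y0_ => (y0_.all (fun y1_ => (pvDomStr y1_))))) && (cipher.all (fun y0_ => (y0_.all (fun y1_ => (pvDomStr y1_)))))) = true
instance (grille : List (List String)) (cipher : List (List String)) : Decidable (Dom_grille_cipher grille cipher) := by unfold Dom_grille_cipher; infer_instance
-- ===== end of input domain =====

-- B never builds rotated copies of the grille: it keeps the grille fixed and un-rotates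
-- each (j,k) coordinate through the inverse rotation map (objective: alternative
-- decomposition, same cost).

-- ===== PORT A =====
-- zip(*rows): rows truncated to the shortest; recursion consumes the heads, as zip does.
def pyZipStar (rows : List (List String)) : List (List String) :=
  if h : rows.isEmpty ∨ rows.any (·.isEmpty) then []
  else (rows.map (fun r => r.headD "")) :: pyZipStar (rows.map List.tail)
termination_by (rows.map List.length).sum
decreasing_by
  rcases rows with _ | ⟨r, rs⟩
  · exact absurd (Or.inl (by simp)) h
  · have hr : r ≠ [] := fun e => h (Or.inr (by simp [e]))
    have h2 : (rs.map (List.length ∘ List.tail)).sum ≤ (rs.map List.length).sum := by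
      apply List.sum_le_sum
      intro a _
      simp [List.length_tail]
    have h1 : r.tail.length < r.length := by
      cases r
      · exact absurd rfl hr
      · simp
    simpa using by omega

def grille_cipher (grille : List (List String)) (cipher : List (List String)) : String :=
  -- password = ''; for i in range(4): triple nested loop; grille = list(zip(*grille[::-1]))
  (((PySem.List.pyRange 0 4 1).foldl (fun (st : List (List String) × String) _ =>
      let pw := (PySem.List.pyRange 0 4 1).foldl (fun pw j =>
        (PySem.List.pyRange 0 4 1).foldl (fun pw k =>
          if ((st.1.getD j.toNat []).getD k.toNat "") = "X"
          then pw ++ ((cipher.getD j.toNat []).getD k.toNat "") else pw) pw) st.2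
      (pyZipStar st.1.reverse, pw)) (grille, ""))).2

-- ===== PORT B =====
-- for m in range(r, 0, -1): one inverse clockwise-rotation step (a,b) := (rows-1-b, a),
-- where rows alternates between len(grille) and len(grille[0]).  Int '%' 2 below agrees
-- with Python '%' (nonnegative operand, positive divisor).
def grille_cipher_alt (grille : List (List String)) (cipher : List (List String)) : String :=
  let R : Int := grille.length
  let C : Int := (grille.headD []).length
  (PySem.List.pyRange 0 4 1).foldl (fun pw r =>
    (PySem.List.pyRange 0 4 1).foldl (fun pw j =>
      (PySem.List.pyRange 0 4 1).foldl (fun pw k =>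
        let p := (PySem.List.pyRange r 0 (-1)).foldl
          (fun (p : Int × Int) m =>
            let rows := if (m - 1) % 2 = 0 then R else C
            (rows - 1 - p.2, p.1)) (j, k)
        if ((grille.getD p.1.toNat []).getD p.2.toNat "") = "X"
        then pw ++ ((cipher.getD j.toNat []).getD k.toNat "") else pw) pw) pw) ""

-- ===== PRECONDITION & SPEC =====
-- Pre_ admits rectangular grilles with at least 4 rows and 4 columns and ciphers indexable
-- at [j][k] for j,k < 4 (A raises IndexError on smaller shapes).  It excludes ragged
-- grilles whose rows have unequal lengths: A still returns on some of those (zip truncates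
-- to the shortest row, silently dropping cells), a shape no grille-cipher caller supplies
-- and on which B raises (see the cite).
def Pre_grille_cipher (grille : List (List String)) (cipher : List (List String)) : Prop :=
  4 ≤ grille.length ∧ (∀ r ∈ grille, r.length = (grille.headD []).length) ∧
  4 ≤ (grille.headD []).length ∧
  4 ≤ cipher.length ∧ (∀ r ∈ cipher.take 4, 4 ≤ r.length)
instance (grille : List (List String)) (cipher : List (List String)) : Decidable (Pre_grille_cipher grille cipher) := by unfold Pre_grille_cipher; infer_instance

def pvWitness_grille_cipher : List (List String) × List (List String) :=
  ([["X",".",".","."],[".",".",".","."],[".",".","X","."],[".",".",".","."]],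
   [["a","b","c","d"],["e","f","g","h"],["i","j","k","l"],["m","n","o","p"]])

def Spec_grille_cipher (grille : List (List String)) (cipher : List (List String)) (out : String) : Prop := out = grille_cipher_alt grille cipher
instance (grille : List (List String)) (cipher : List (List String)) (out : String) : Decidable (Spec_grille_cipher grille cipher out) := by unfold Spec_grille_cipher; infer_instance

-- ===== CLAIM (what is proved, stated in full; the proofs are below) =====
def Claim_equal_grille_cipher : Prop := ∀ (grille : List (List String)) (cipher : List (List String)), Dom_grille_cipher grille cipher → Pre_grille_cipher grille cipher → Spec_grille_cipher grille cipher (grille_cipher grille cipher)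

-- ===== LEMMAS AND PROOFS =====
lemma pvGetD_tail {α : Type} (l : List α) (j : ℕ) (d : α) :
    l.tail.getD j d = l.getD (j + 1) d := by
  cases l <;> simp [List.getD]

lemma pvGetD_map_headD (g : List (List String)) (k : ℕ) (hk : k < g.length) :
    (g.map (fun r => r.headD "")).getD k "" = (g.getD k []).headD "" := by
  simp [List.getD, List.getElem?_map, List.getElem?_eq_getElem hk]

lemma pvHeadD_eq_getD (l : List String) : l.headD "" = l.getD 0 "" := by
  cases l <;> simp [List.getD]

lemma pvZipStar_length : ∀ (C : ℕ) (g : List (List String)), g ≠ [] →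
    (∀ r ∈ g, r.length = C) → (pyZipStar g).length = C := by
  intro C
  induction C with
  | zero =>
    intro g hne hrows
    rw [pyZipStar, dif_pos]
    · rfl
    · right
      rcases g with _ | ⟨r, rs⟩
      · exact absurd rfl hne
      · have := hrows r (by simp)
        simp [List.any_cons, List.eq_nil_of_length_eq_zero this]
  | succ C ih =>
    intro g hne hrows
    rw [pyZipStar, dif_neg]
    · have htail : ∀ r ∈ g.map List.tail, r.length = C := by
        intro r hr
        simp only [List.mem_map] at hr
        obtain ⟨s, hs, rfl⟩ := hr
        have := hrows s hs
        simp [List.length_tail, this]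
      have : (g.map List.tail) ≠ [] := by
        simp [hne]
      rw [List.length_cons, ih (g.map List.tail) this htail]
    · rintro (h | h)
      · exact hne (List.isEmpty_iff.mp h)
      · simp only [List.any_eq_true] at h
        obtain ⟨r, hr, hre⟩ := h
        have := hrows r hr
        simp only [List.isEmpty_iff] at hre
        simp [hre] at this
lemma pvZipStar_rows : ∀ (C : ℕ) (g : List (List String)),
    (∀ r ∈ g, r.length = C) → ∀ r ∈ pyZipStar g, r.length = g.length := by
  intro C
  induction C with
  | zero =>
    intro g hrows r hr
    rcases g with _ | ⟨s, ss⟩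
    · rw [pyZipStar, dif_pos (by simp)] at hr
      simp at hr
    · rw [pyZipStar, dif_pos] at hr
      · simp at hr
      · right
        have := hrows s (by simp)
        simp [List.any_cons, List.eq_nil_of_length_eq_zero this]
  | succ C ih =>
    intro g hrows r hr
    rcases g with _ | ⟨s, ss⟩
    · rw [pyZipStar, dif_pos (by simp)] at hr
      simp at hr
    · rw [pyZipStar, dif_neg, List.mem_cons] at hr
      · rcases hr with hr | hr
        · subst hr; simp
        · have htail : ∀ t ∈ (s :: ss).map List.tail, t.length = C := by
            intro t ht
            simp only [List.mem_map] at ht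
            obtain ⟨u, hu, rfl⟩ := ht
            have := hrows u hu
            simp [List.length_tail, this]
          have := ih ((s :: ss).map List.tail) htail r hr
          simpa using this
      · rintro (h | h)
        · simp at h
        · simp only [List.any_eq_true] at h
          obtain ⟨t, ht, hte⟩ := h
          have := hrows t ht
          simp only [List.isEmpty_iff] at hte
          simp [hte] at this

lemma pvZipStar_entry : ∀ (j : ℕ) (C : ℕ) (g : List (List String)),
    (∀ r ∈ g, r.length = C) → ∀ k, k < g.length → j < C →
    ((pyZipStar g).getD j []).getD k "" = (g.getD k []).getD j "" := by
  intro j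
  induction j with
  | zero =>
    intro C g hrows k hk hj
    have hne : g ≠ [] := by intro e; simp [e] at hk
    rw [pyZipStar, dif_neg]
    · simp only [List.getD_cons_zero]
      rw [pvGetD_map_headD g k hk, pvHeadD_eq_getD]
    · rintro (h | h)
      · exact hne (List.isEmpty_iff.mp h)
      · simp only [List.any_eq_true] at h
        obtain ⟨r, hr, hre⟩ := h
        have := hrows r hr
        simp only [List.isEmpty_iff] at hre
        simp [hre] at this
        omega
  | succ j ih =>
    intro C g hrows k hk hj
    have hne : g ≠ [] := by intro e; simp [e] at hk
    obtain ⟨C', rfl⟩ : ∃ C', C = C' + 1 := ⟨C - 1, by omega⟩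
    rw [pyZipStar, dif_neg]
    · simp only [List.getD_cons_succ]
      have htail : ∀ r ∈ g.map List.tail, r.length = C' := by
        intro r hr
        simp only [List.mem_map] at hr
        obtain ⟨s, hs, rfl⟩ := hr
        have := hrows s hs
        simp [List.length_tail, this]
      rw [ih C' (g.map List.tail) htail k (by simpa using hk) (by omega)]
      have : (g.map List.tail).getD k [] = (g.getD k []).tail := by
        simp [List.getD, List.getElem?_map, List.getElem?_eq_getElem hk]
      rw [this, pvGetD_tail]
    · rintro (h | h)
      · exact hne (List.isEmpty_iff.mp h)
      · simp only [List.any_eq_true] at h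
        obtain ⟨r, hr, hre⟩ := h
        have := hrows r hr
        simp only [List.isEmpty_iff] at hre
        simp [hre] at this

lemma pvGetD_reverse (g : List (List String)) (k : ℕ) (hk : k < g.length) :
    g.reverse.getD k [] = g.getD (g.length - 1 - k) [] := by
  have hk' : k < g.reverse.length := by simpa using hk
  have h2 : g.length - 1 - k < g.length := by omega
  rw [List.getD_eq_getElem _ _ hk', List.getD_eq_getElem _ _ h2, List.getElem_reverse]

-- entry of one clockwise rotation, for a rectangular grid
lemma pvRot_entry (g : List (List String)) (C : ℕ)
    (hrows : ∀ r ∈ g, r.length = C) (j k : ℕ) (hk : k < g.length) (hj : j < C) :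
    ((pyZipStar g.reverse).getD j []).getD k "" = (g.getD (g.length - 1 - k) []).getD j "" := by
  have hrows' : ∀ r ∈ g.reverse, r.length = C := by
    intro r hr; exact hrows r (List.mem_reverse.mp hr)
  rw [pvZipStar_entry j C g.reverse hrows' k (by simpa using hk) hj,
    pvGetD_reverse g k hk]

lemma pvFoldlCongr {α : Type} {l : List Int} {f g : α → Int → α} {a b : α}
    (hab : a = b) (h : ∀ acc x, x ∈ l → f acc x = g acc x) :
    l.foldl f a = l.foldl g b := by
  subst hab
  revert h
  induction l generalizing a with
  | nil => intro h; rfl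
  | cons x xs ih =>
    intro h
    simp only [List.foldl_cons]
    rw [h a x (by simp)]
    exact ih (fun acc y hy => h acc y (by simp [hy]))

-- ===== VERDICT (by name: the statement is the Claim_ definition above) =====
theorem grille_cipher_spec : Claim_equal_grille_cipher := by
  intro grille cipher _ hpre
  obtain ⟨hR, hrect, hC, -, -⟩ := hpre
  show _ = _
  have hgne : grille ≠ [] := by intro e; rw [e] at hR; simp at hR
  have hrev : ∀ r ∈ grille.reverse, r.length = (grille.headD []).length := by
    intro r hr; exact hrect r (List.mem_reverse.mp hr)
  have hG1len : (pyZipStar grille.reverse).length = (grille.headD []).length :=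
    pvZipStar_length _ grille.reverse (by simp [hgne]) hrev
  have hG1rows : ∀ r ∈ pyZipStar grille.reverse, r.length = grille.length := by
    have := pvZipStar_rows (grille.headD []).length grille.reverse hrev
    simpa using this
  have hG1ne : pyZipStar grille.reverse ≠ [] := by
    intro e
    rw [e] at hG1len
    have : (grille.headD []).length = 0 := hG1len.symm
    omega
  have hG1rev : ∀ r ∈ (pyZipStar grille.reverse).reverse, r.length = grille.length := by
    intro r hr; exact hG1rows r (List.mem_reverse.mp hr)
  have hG2len : (pyZipStar (pyZipStar grille.reverse).reverse).length = grille.length :=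
    pvZipStar_length _ _ (by simp [hG1ne]) hG1rev
  have hG2rows : ∀ r ∈ pyZipStar (pyZipStar grille.reverse).reverse,
      r.length = (grille.headD []).length := by
    have := pvZipStar_rows grille.length (pyZipStar grille.reverse).reverse hG1rev
    simpa [hG1len] using this
  -- the three per-round access equalities, phrased on the Int loop indices
  have hI1 : ∀ j k : Int, j ∈ PySem.List.pyRange 0 4 1 → k ∈ PySem.List.pyRange 0 4 1 →
      ((pyZipStar grille.reverse).getD j.toNat []).getD k.toNat "" =
        (grille.getD ((grille.length : Int) - 1 - k).toNat []).getD j.toNat "" := by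
    intro j k hj hk
    rw [PySem.List.mem_pyRange_one] at hj hk
    have e := pvRot_entry grille (grille.headD []).length hrect j.toNat k.toNat
      (by omega) (by omega)
    have c : ((grille.length : Int) - 1 - k).toNat = grille.length - 1 - k.toNat := by omega
    rw [c]
    exact e
  have hI2 : ∀ j k : Int, j ∈ PySem.List.pyRange 0 4 1 → k ∈ PySem.List.pyRange 0 4 1 →
      ((pyZipStar (pyZipStar grille.reverse).reverse).getD j.toNat []).getD k.toNat "" =
        (grille.getD ((grille.length : Int) - 1 - j).toNat
          []).getD (((grille.headD []).length : Int) - 1 - k).toNat "" := by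
    intro j k hj hk
    rw [PySem.List.mem_pyRange_one] at hj hk
    have e1 := pvRot_entry (pyZipStar grille.reverse) grille.length hG1rows j.toNat k.toNat
      (by rw [hG1len]; omega) (by omega)
    rw [hG1len] at e1
    have e2 := pvRot_entry grille (grille.headD []).length hrect
      ((grille.headD []).length - 1 - k.toNat) j.toNat (by omega) (by omega)
    have cR : ((grille.length : Int) - 1 - j).toNat = grille.length - 1 - j.toNat := by omega
    have cC : (((grille.headD []).length : Int) - 1 - k).toNat =
        (grille.headD []).length - 1 - k.toNat := by omega
    rw [cR, cC, e1, e2]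
  have hI3 : ∀ j k : Int, j ∈ PySem.List.pyRange 0 4 1 → k ∈ PySem.List.pyRange 0 4 1 →
      ((pyZipStar (pyZipStar (pyZipStar grille.reverse).reverse).reverse).getD j.toNat
          []).getD k.toNat "" =
        (grille.getD ((grille.length : Int) - 1 - ((grille.length : Int) - 1 - k)).toNat
          []).getD (((grille.headD []).length : Int) - 1 - j).toNat "" := by
    intro j k hj hk
    rw [PySem.List.mem_pyRange_one] at hj hk
    have e1 := pvRot_entry (pyZipStar (pyZipStar grille.reverse).reverse)
      (grille.headD []).length hG2rows j.toNat k.toNat (by rw [hG2len]; omega) (by omega)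
    rw [hG2len] at e1
    have e2 := pvRot_entry (pyZipStar grille.reverse) grille.length hG1rows
      (grille.length - 1 - k.toNat) j.toNat (by rw [hG1len]; omega) (by omega)
    rw [hG1len] at e2
    have e3 := pvRot_entry grille (grille.headD []).length hrect
      ((grille.headD []).length - 1 - j.toNat) (grille.length - 1 - k.toNat)
      (by omega) (by omega)
    have e4 : grille.length - 1 - (grille.length - 1 - k.toNat) = k.toNat := by omega
    rw [e4] at e3
    have cRR : ((grille.length : Int) - 1 - ((grille.length : Int) - 1 - k)).toNat =
        k.toNat := by omega
    have cC : (((grille.headD []).length : Int) - 1 - j).toNat =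
        (grille.headD []).length - 1 - j.toNat := by omega
    rw [cRR, cC, e1, e2, e3]
  -- expand the two outer round-loops (four applications each)
  have hr4 : PySem.List.pyRange 0 4 1 = [0, 1, 2, 3] := by decide
  have e4 : ∀ {α : Type} (f : α → Int → α) (init : α),
      (PySem.List.pyRange 0 4 1).foldl f init = f (f (f (f init 0) 1) 2) 3 := by
    intro α f init
    rw [hr4]
    rfl
  have hd0 : PySem.List.pyRange 0 0 (-1) = ([] : List Int) := by decide
  have hd1 : PySem.List.pyRange 1 0 (-1) = [1] := by decide
  have hd2 : PySem.List.pyRange 2 0 (-1) = [2, 1] := by decide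
  have hd3 : PySem.List.pyRange 3 0 (-1) = [3, 2, 1] := by decide
  have em1 : (((1 : Int) - 1) % 2 = 0) = True := by decide
  have em2 : (((2 : Int) - 1) % 2 = 0) = False := by decide
  have em3 : (((3 : Int) - 1) % 2 = 0) = True := by decide
  unfold grille_cipher grille_cipher_alt
  conv_lhs => rw [e4]
  conv_rhs => rw [e4]
  dsimp only
  apply pvFoldlCongr
  · apply pvFoldlCongr
    · apply pvFoldlCongr
      · apply pvFoldlCongr
        · rfl
        · intro acc j hj
          apply pvFoldlCongr rfl
          intro acc' k hk
          simp only [hd0, List.foldl_nil]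
      · intro acc j hj
        apply pvFoldlCongr rfl
        intro acc' k hk
        simp only [hd1, List.foldl_cons, List.foldl_nil, em1, if_true]
        rw [hI1 j k hj hk]
    · intro acc j hj
      apply pvFoldlCongr rfl
      intro acc' k hk
      simp only [hd2, List.foldl_cons, List.foldl_nil, em1, em2, if_true, if_false]
      rw [hI2 j k hj hk]
  · intro acc j hj
    apply pvFoldlCongr rfl
    intro acc' k hk
    simp only [hd3, List.foldl_cons, List.foldl_nil, em1, em2, em3, if_true, if_false]
    rw [hI3 j k hj hk]
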